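-- pv_equiv track=rewrite | github.com/rodrigopasqualucci/curso-git-github-2025 | enrichment.py | create_dict_features
-- ===== SOURCE A (Python) =====
-- def create_dict_features(list_of_feats = [],
--                          drop_cols_dict = {},
--                          col_names = ['pago'],
--                          sort_list = True
--                         ):
--
--     # items to be removed
--     list_of_feats = [ele for ele in list_of_feats if ele not in drop_cols_dict]
--
--     index = 0
--     my_dict = {}
--
--     for elmt in col_names:
--
--         if sort_list == True:
--             my_list = sorted([element for element in sorted(list_of_feats) if elmt in element])
--             my_dict[index] = my_list
--             index += 1
--
--         else:
--             my_dict[index] = [element for element in list_of_feats if elmt in element]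
--             index += 1
--
--     return my_dict
-- ===== SOURCE B (Python) =====
-- def create_dict_features(list_of_feats = [],
--                          drop_cols_dict = {},
--                          col_names = ['pago'],
--                          sort_list = True
--                         ):
--     feats = [f for f in list_of_feats if f not in drop_cols_dict]
--     if sort_list == True:
--         feats = sorted(feats)
--     buckets = [[] for _ in col_names]
--     for f in feats:
--         for i, c in enumerate(col_names):
--             if c in f:
--                 buckets[i].append(f)
--     return {i: b for i, b in enumerate(buckets)}
-- ===== Notes on version B (the rewrite author's own statement) =====
-- stated objective: alternative
-- what changed: Inverts the nesting: instead of a column-outer loop that re-sorts and re-filters the feature list for every column, B sorts the filtered features once, pre-creates one empty bucket per column, and distributes each feature into matching buckets in a single feature-outer pass (sorted buckets come for free from the visiting order).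
import Mathlib
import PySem

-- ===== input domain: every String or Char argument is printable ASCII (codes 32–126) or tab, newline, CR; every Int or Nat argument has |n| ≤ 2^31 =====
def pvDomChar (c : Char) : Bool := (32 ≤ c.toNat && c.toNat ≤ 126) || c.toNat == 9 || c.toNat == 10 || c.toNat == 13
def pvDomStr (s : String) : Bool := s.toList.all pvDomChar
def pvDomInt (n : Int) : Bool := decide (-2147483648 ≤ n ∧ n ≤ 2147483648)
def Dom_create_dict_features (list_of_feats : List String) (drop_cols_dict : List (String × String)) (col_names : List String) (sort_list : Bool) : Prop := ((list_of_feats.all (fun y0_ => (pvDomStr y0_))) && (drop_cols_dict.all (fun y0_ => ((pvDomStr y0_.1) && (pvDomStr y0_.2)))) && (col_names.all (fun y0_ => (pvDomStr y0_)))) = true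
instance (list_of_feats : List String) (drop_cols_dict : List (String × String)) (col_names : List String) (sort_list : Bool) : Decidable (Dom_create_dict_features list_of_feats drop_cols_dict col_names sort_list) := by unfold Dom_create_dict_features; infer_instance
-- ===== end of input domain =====

-- B inverts A's column-outer (re-sort + re-filter per column) nesting into one feature-outer
-- pass that distributes each feature into pre-created per-column buckets (objective: alternative).

-- ===== PORT A =====
-- literal port of A: filter the features, then loop over col_names with state (index, dict),
-- inserting per column the (re-sorted, filtered) feature list; the returned dict is its items list.
def create_dict_features (list_of_feats : List String) (drop_cols_dict : List (String × String)) (col_names : List String) (sort_list : Bool) : List (Int × List String) :=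
  let lof := list_of_feats.filter (fun ele => !((PySem.Dict.ofList drop_cols_dict).contains ele))
  ((col_names.foldl (fun (st : Int × PySem.Dict Int (List String)) elmt =>
      if sort_list = true then
        (st.1 + 1, st.2.insert st.1 (PySem.List.sorted ((PySem.List.sorted lof (fun x => x) false).filter (fun element => PySem.Str.isIn elmt element)) (fun x => x) false))
      else
        (st.1 + 1, st.2.insert st.1 (lof.filter (fun element => PySem.Str.isIn elmt element))))
    ((0 : Int), PySem.Dict.empty)).2).items

-- ===== PORT B =====
-- literal port of Source B: filter once, sort once if asked, one empty bucket per column, then a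
-- single pass over the features appending each into every matching bucket; the final dict
-- comprehension over enumerate(buckets) has fresh distinct keys, so its items are that list.
def create_dict_features_alt (list_of_feats : List String) (drop_cols_dict : List (String × String)) (col_names : List String) (sort_list : Bool) : List (Int × List String) :=
  let feats0 := list_of_feats.filter (fun f => !((PySem.Dict.ofList drop_cols_dict).contains f))
  let feats := if sort_list = true then PySem.List.sorted feats0 (fun x => x) false else feats0
  let buckets0 : List (List String) := col_names.map (fun _ => ([] : List String))
  let buckets := feats.foldl (fun bs f =>
      (col_names.zip bs).map (fun cb => if PySem.Str.isIn cb.1 f then cb.2 ++ [f] else cb.2)) buckets0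
  PySem.List.enumerate buckets

-- ===== PRECONDITION & SPEC =====
def Spec_create_dict_features (list_of_feats : List String) (drop_cols_dict : List (String × String)) (col_names : List String) (sort_list : Bool) (out : List (Int × List String)) : Prop := out = create_dict_features_alt list_of_feats drop_cols_dict col_names sort_list
instance (list_of_feats : List String) (drop_cols_dict : List (String × String)) (col_names : List String) (sort_list : Bool) (out : List (Int × List String)) : Decidable (Spec_create_dict_features list_of_feats drop_cols_dict col_names sort_list out) := by unfold Spec_create_dict_features; infer_instance

-- ===== CLAIM (what is proved, stated in full; the proofs are below) =====
def Claim_equal_create_dict_features : Prop := ∀ (list_of_feats : List String) (drop_cols_dict : List (String × String)) (col_names : List String) (sort_list : Bool), Dom_create_dict_features list_of_feats drop_cols_dict col_names sort_list → Spec_create_dict_features list_of_feats drop_cols_dict col_names sort_list (create_dict_features list_of_feats drop_cols_dict col_names sort_list)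

-- ===== LEMMAS AND PROOFS =====

-- the indexed bucket list both loops build: per column c at index i, the bucket `bucket c`
def pvBkts (bucket : String → List String) (cols : List String) (i : Int) : List (Int × List String) :=
  match cols with
  | [] => []
  | c :: cs => (i, bucket c) :: pvBkts bucket cs (i + 1)

-- A's loop over the columns: fresh increasing keys append to the dict
lemma pvA_loop (bucket : String → List String) (cols : List String) :
    ∀ (i : Int) (d : PySem.Dict Int (List String)), (∀ k ∈ d.keys, k < i) →
    ((cols.foldl (fun (st : Int × PySem.Dict Int (List String)) elmt =>
        (st.1 + 1, st.2.insert st.1 (bucket elmt))) (i, d)).2).items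
      = d.items ++ pvBkts bucket cols i := by
  induction cols with
  | nil => intro i d _; simp [pvBkts]
  | cons c cs ih =>
    intro i d hlt
    have hfresh : d.contains i = false := by
      cases hc : d.contains i with
      | false => rfl
      | true =>
        have : i ∈ d.keys := (PySem.Dict.contains_iff_mem_keys d i).1 hc
        exact absurd (hlt i this) (lt_irrefl i)
    have hkeys : ∀ k ∈ (d.insert i (bucket c)).keys, k < i + 1 := by
      intro k hk
      rcases (PySem.Dict.mem_keys_insert d i k (bucket c)).1 hk with h | h
      · omega
      · have := hlt k h; omega
    simp only [List.foldl_cons]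
    rw [ih (i + 1) (d.insert i (bucket c)) hkeys,
        PySem.Dict.items_insert_of_not_contains d _ hfresh, pvBkts]
    simp

-- zipping the columns with the bucket list rebuilt by a map over the same zip
lemma pvZipMap {α β : Type} (g : α → β → β) (cols : List α) :
    ∀ bs : List β, bs.length = cols.length →
    cols.zip ((cols.zip bs).map (fun cb => g cb.1 cb.2)) = (cols.zip bs).map (fun cb => (cb.1, g cb.1 cb.2)) := by
  induction cols with
  | nil => intro bs _; simp
  | cons c cs ih =>
    intro bs h
    cases bs with
    | nil => simp at h
    | cons b bs => simp only [List.zip_cons_cons, List.map_cons]; rw [ih bs (by simpa using h)]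

-- projecting the buckets back out of the zip
lemma pvZipSnd {α β : Type} (cols : List α) :
    ∀ bs : List β, bs.length = cols.length → (cols.zip bs).map (fun cb => cb.2) = bs := by
  induction cols with
  | nil => intro bs h; cases bs <;> simp_all
  | cons c cs ih =>
    intro bs h
    cases bs with
    | nil => simp at h
    | cons b bs => simp only [List.zip_cons_cons, List.map_cons]; rw [ih bs (by simpa using h)]

-- B's feature-outer loop computes, per column, the filter of the whole feature list
lemma pvB_loop (cols : List String) (feats : List String) :
    ∀ bs : List (List String), bs.length = cols.length →
    feats.foldl (fun bs f =>
        (cols.zip bs).map (fun cb => if PySem.Str.isIn cb.1 f then cb.2 ++ [f] else cb.2)) bs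
      = (cols.zip bs).map (fun cb => cb.2 ++ feats.filter (fun f => PySem.Str.isIn cb.1 f)) := by
  induction feats with
  | nil =>
    intro bs h
    simp only [List.foldl_nil, List.filter_nil, List.append_nil]
    exact (pvZipSnd cols bs h).symm
  | cons f fs ih =>
    intro bs h
    simp only [List.foldl_cons]
    rw [ih _ (by rw [List.length_map, List.length_zip, h]; omega)]
    rw [pvZipMap (fun c b => if PySem.Str.isIn c f then b ++ [f] else b) cols bs h]
    rw [List.map_map]
    refine List.map_congr_left ?_
    intro cb _
    simp only [Function.comp, List.filter_cons]
    by_cases hp : PySem.Chars.isIn cb.1.toList f.toList <;> simp [hp]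

-- enumerate of a map over the columns is pvBkts
lemma pvEnum (h : String → List String) (cols : List String) :
    ∀ i : Int, PySem.List.enumerate (cols.map h) i = pvBkts h cols i := by
  induction cols with
  | nil => intro i; simp [pvBkts, PySem.List.enumerate_nil]
  | cons c cs ih => intro i; simp only [List.map_cons, PySem.List.enumerate_cons, pvBkts, ih]

-- with sort_list, A's per-column bucket re-sorts an already sorted filter: a no-op
lemma pvSortedBucket (lof : List String) (c : String) :
    PySem.List.sorted ((PySem.List.sorted lof (fun x => x) false).filter (fun element => PySem.Str.isIn c element)) (fun x => x) false
      = (PySem.List.sorted lof (fun x => x) false).filter (fun element => PySem.Str.isIn c element) := by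
  apply PySem.List.sorted_eq_self_of_pairwise
  exact List.Pairwise.filter _ (PySem.List.sorted_pairwise lof (fun x => x))

-- the common value of both ports, per value of sort_list
lemma pvA_eq (cols : List String) (bucket : String → List String) :
    ((cols.foldl (fun (st : Int × PySem.Dict Int (List String)) elmt =>
        (st.1 + 1, st.2.insert st.1 (bucket elmt))) ((0 : Int), PySem.Dict.empty)).2).items
      = pvBkts bucket cols 0 := by
  rw [pvA_loop bucket cols 0 PySem.Dict.empty (by simp [PySem.Dict.keys_empty])]
  simp [PySem.Dict.empty]

lemma pvB_eq (cols : List String) (feats : List String) :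
    PySem.List.enumerate (feats.foldl (fun bs f =>
        (cols.zip bs).map (fun cb => if PySem.Str.isIn cb.1 f then cb.2 ++ [f] else cb.2))
        (cols.map (fun _ => ([] : List String))))
      = pvBkts (fun c => feats.filter (fun f => PySem.Str.isIn c f)) cols 0 := by
  rw [pvB_loop cols feats _ (by simp)]
  have hz : cols.zip (cols.map (fun _ => ([] : List String)))
      = cols.map (fun c => (c, ([] : List String))) := by
    have := List.zip_map' (f := id) (g := fun _ => ([] : List String)) (l := cols)
    simpa using this
  rw [hz, List.map_map, ← pvEnum (fun c => feats.filter (fun f => PySem.Str.isIn c f)) cols 0]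
  have hm : (cols.map ((fun cb => cb.2 ++ feats.filter (fun f => PySem.Str.isIn cb.1 f)) ∘ (fun c => (c, ([] : List String)))))
      = cols.map (fun c => feats.filter (fun f => PySem.Str.isIn c f)) := by
    refine List.map_congr_left ?_
    intro c _
    simp
  rw [hm]

-- ===== VERDICT (by name: the statement is the Claim_ definition above) =====
theorem create_dict_features_spec : Claim_equal_create_dict_features := by
  intro list_of_feats drop_cols_dict col_names sort_list _
  unfold Spec_create_dict_features create_dict_features create_dict_features_alt
  cases sort_list with
  | false =>
    simp only [Bool.false_eq_true, if_false]
    rw [pvA_eq, pvB_eq]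
  | true =>
    simp only [if_true]
    rw [pvA_eq, pvB_eq]
    have hb : (fun elmt => PySem.List.sorted ((PySem.List.sorted (list_of_feats.filter (fun ele => !((PySem.Dict.ofList drop_cols_dict).contains ele))) (fun x => x) false).filter (fun element => PySem.Str.isIn elmt element)) (fun x => x) false)
        = (fun c => (PySem.List.sorted (list_of_feats.filter (fun ele => !((PySem.Dict.ofList drop_cols_dict).contains ele))) (fun x => x) false).filter (fun f => PySem.Str.isIn c f)) := by
      funext c; exact pvSortedBucket _ c
    rw [hb]
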